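-- pv_equiv track=rewrite | github.com/Tejas-Chakkarwar/Tejas-Chakkarwar | research_feasibility_agent/modules/market_analyzer.py | _identify_market_trends
-- ===== SOURCE A (Python) =====
-- from typing import List, Dict, Tuple
--
-- def _identify_market_trends(text: str) -> List[str]:
--     """Identify relevant market trends"""
--     trends = []
--
--     # Digital transformation
--     if any(word in text for word in ["digital", "online", "cloud", "saas"]):
--         trends.append("Digital transformation accelerating across industries")
--
--     # AI/ML trend
--     if any(word in text for word in ["ai", "machine learning", "automation"]):
--         trends.append("AI/ML adoption growing rapidly across sectors")
--
--     # Remote/hybrid work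
--     if any(word in text for word in ["remote", "hybrid", "distributed"]):
--         trends.append("Remote and hybrid work models becoming permanent")
--
--     # Sustainability
--     if any(word in text for word in ["sustainable", "green", "climate", "esg"]):
--         trends.append("Sustainability and ESG priorities driving investment")
--
--     # Privacy and security
--     if any(word in text for word in ["privacy", "security", "cybersecurity"]):
--         trends.append("Privacy and security concerns increasing regulation and spending")
--
--     # Personalization
--     if any(word in text for word in ["personalization", "customization", "tailored"]):
--         trends.append("Personalization becoming expected rather than differentiator")
--
--     # Subscription economy
--     if any(word in text for word in ["subscription", "saas", "recurring revenue"]):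
--         trends.append("Shift from ownership to subscription models")
--
--     # Mobile-first
--     if "mobile" in text:
--         trends.append("Mobile-first approach increasingly critical")
--
--     # Healthcare innovation
--     if any(word in text for word in ["health", "medical", "telemedicine"]):
--         trends.append("Healthcare digitization accelerating post-pandemic")
--
--     # Blockchain/Web3
--     if any(word in text for word in ["blockchain", "web3", "decentralized"]):
--         trends.append("Blockchain and decentralization gaining traction")
--
--     return trends
-- ===== SOURCE B (Python) =====
-- from typing import List
--
-- TREND_RULES = [
--     (["digital", "online", "cloud", "saas"], "Digital transformation accelerating across industries"),
--     (["ai", "machine learning", "automation"], "AI/ML adoption growing rapidly across sectors"),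
--     (["remote", "hybrid", "distributed"], "Remote and hybrid work models becoming permanent"),
--     (["sustainable", "green", "climate", "esg"], "Sustainability and ESG priorities driving investment"),
--     (["privacy", "security", "cybersecurity"], "Privacy and security concerns increasing regulation and spending"),
--     (["personalization", "customization", "tailored"], "Personalization becoming expected rather than differentiator"),
--     (["subscription", "saas", "recurring revenue"], "Shift from ownership to subscription models"),
--     (["mobile"], "Mobile-first approach increasingly critical"),
--     (["health", "medical", "telemedicine"], "Healthcare digitization accelerating post-pandemic"),
--     (["blockchain", "web3", "decentralized"], "Blockchain and decentralization gaining traction"),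
-- ]
--
-- # every distinct keyword, for the single text-driven scan
-- ALL_KEYWORDS = []
-- for _kws, _ in TREND_RULES:
--     for _k in _kws:
--         if _k not in ALL_KEYWORDS:
--             ALL_KEYWORDS.append(_k)
--
-- def _identify_market_trends(text: str) -> List[str]:
--     """Identify relevant market trends"""
--     # single position-driven scan of the text: at each index, record every
--     # keyword that starts there, instead of scanning the text once per keyword
--     found = set()
--     for i in range(len(text)):
--         for k in ALL_KEYWORDS:
--             if text.startswith(k, i):
--                 found.add(k)
--     return [msg for kws, msg in TREND_RULES if any(k in found for k in kws)]
-- ===== Notes on version B (the rewrite author's own statement) =====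
-- stated objective: alternative
-- what changed: Replaced the ten rule-driven substring scans (each 'in' rescanning the text) with a single position-driven scan of the text that collects every keyword starting at each index into a set, then maps the rule table against that set.
import Mathlib
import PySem

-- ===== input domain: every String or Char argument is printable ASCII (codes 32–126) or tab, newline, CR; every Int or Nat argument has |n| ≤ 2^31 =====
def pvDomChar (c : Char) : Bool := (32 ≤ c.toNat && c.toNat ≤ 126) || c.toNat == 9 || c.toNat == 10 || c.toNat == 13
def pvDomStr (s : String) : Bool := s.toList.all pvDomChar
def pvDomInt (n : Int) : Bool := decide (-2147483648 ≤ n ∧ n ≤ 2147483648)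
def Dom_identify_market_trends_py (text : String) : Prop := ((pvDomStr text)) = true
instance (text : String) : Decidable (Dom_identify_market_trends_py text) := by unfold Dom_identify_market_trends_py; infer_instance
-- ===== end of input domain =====

-- B replaces ten per-rule text scans by one position-driven scan collecting matched keywords into a set (alternative algorithm; return values proved equal).

-- ===== PORT A =====
-- literal transliteration of A: ten sequential if-blocks, each appending its trend string
def identify_market_trends_py (text : String) : List String :=
  let trends : List String := []
  let trends := if ["digital", "online", "cloud", "saas"].any (fun w => PySem.Str.isIn w text) then trends ++ ["Digital transformation accelerating across industries"] else trends
  let trends := if ["ai", "machine learning", "automation"].any (fun w => PySem.Str.isIn w text) then trends ++ ["AI/ML adoption growing rapidly across sectors"] else trends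
  let trends := if ["remote", "hybrid", "distributed"].any (fun w => PySem.Str.isIn w text) then trends ++ ["Remote and hybrid work models becoming permanent"] else trends
  let trends := if ["sustainable", "green", "climate", "esg"].any (fun w => PySem.Str.isIn w text) then trends ++ ["Sustainability and ESG priorities driving investment"] else trends
  let trends := if ["privacy", "security", "cybersecurity"].any (fun w => PySem.Str.isIn w text) then trends ++ ["Privacy and security concerns increasing regulation and spending"] else trends
  let trends := if ["personalization", "customization", "tailored"].any (fun w => PySem.Str.isIn w text) then trends ++ ["Personalization becoming expected rather than differentiator"] else trends
  let trends := if ["subscription", "saas", "recurring revenue"].any (fun w => PySem.Str.isIn w text) then trends ++ ["Shift from ownership to subscription models"] else trends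
  let trends := if PySem.Str.isIn "mobile" text then trends ++ ["Mobile-first approach increasingly critical"] else trends
  let trends := if ["health", "medical", "telemedicine"].any (fun w => PySem.Str.isIn w text) then trends ++ ["Healthcare digitization accelerating post-pandemic"] else trends
  let trends := if ["blockchain", "web3", "decentralized"].any (fun w => PySem.Str.isIn w text) then trends ++ ["Blockchain and decentralization gaining traction"] else trends
  trends

-- ===== PORT B =====
def pvTrendRules : List (List String × String) :=
  [ (["digital", "online", "cloud", "saas"], "Digital transformation accelerating across industries"),
    (["ai", "machine learning", "automation"], "AI/ML adoption growing rapidly across sectors"),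
    (["remote", "hybrid", "distributed"], "Remote and hybrid work models becoming permanent"),
    (["sustainable", "green", "climate", "esg"], "Sustainability and ESG priorities driving investment"),
    (["privacy", "security", "cybersecurity"], "Privacy and security concerns increasing regulation and spending"),
    (["personalization", "customization", "tailored"], "Personalization becoming expected rather than differentiator"),
    (["subscription", "saas", "recurring revenue"], "Shift from ownership to subscription models"),
    (["mobile"], "Mobile-first approach increasingly critical"),
    (["health", "medical", "telemedicine"], "Healthcare digitization accelerating post-pandemic"),
    (["blockchain", "web3", "decentralized"], "Blockchain and decentralization gaining traction") ]

-- ALL_KEYWORDS: every distinct keyword of the rule table, in first-occurrence order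
def pvAllKeywords : List String :=
  ["digital", "online", "cloud", "saas", "ai", "machine learning", "automation",
   "remote", "hybrid", "distributed", "sustainable", "green", "climate", "esg",
   "privacy", "security", "cybersecurity", "personalization", "customization", "tailored",
   "subscription", "recurring revenue", "mobile", "health", "medical", "telemedicine",
   "blockchain", "web3", "decentralized"]

-- the set 'found' after B's double loop over text positions and keywords
def pvFound (text : String) : PySem.Set String :=
  (List.range text.toList.length).foldl
    (fun s i =>
      pvAllKeywords.foldl
        (fun s k => if PySem.Chars.startswith (text.toList.drop i) k.toList then PySem.Set.add s k else s) s)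
    PySem.Set.empty

def identify_market_trends_py_alt (text : String) : List String :=
  let found := pvFound text
  (pvTrendRules.filter (fun r => r.1.any (fun k => PySem.Set.contains found k))).map (fun r => r.2)

-- ===== PRECONDITION & SPEC =====
def Spec_identify_market_trends_py (text : String) (out : List String) : Prop := out = identify_market_trends_py_alt text
instance (text : String) (out : List String) : Decidable (Spec_identify_market_trends_py text out) := by unfold Spec_identify_market_trends_py; infer_instance

-- ===== CLAIM (what is proved, stated in full; the proofs are below) =====
def Claim_equal_identify_market_trends_py : Prop := ∀ (text : String), Dom_identify_market_trends_py text → Spec_identify_market_trends_py text (identify_market_trends_py text)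

-- ===== LEMMAS AND PROOFS =====
-- membership in the inner keyword fold
theorem pvMemInner (cond : String → Bool) (ks : List String) (s : PySem.Set String) (x : String) :
    x ∈ ks.foldl (fun s k => if cond k then PySem.Set.add s k else s) s ↔
      x ∈ s ∨ (x ∈ ks ∧ cond x = true) := by
  induction ks generalizing s with
  | nil => simp
  | cons k ks ih =>
    by_cases h : cond k = true
    · simp only [List.foldl_cons, if_pos h, ih, PySem.Set.mem_add, List.mem_cons]
      by_cases hx : x = k
      · subst hx; simp [h]
      · simp [hx]
    · simp only [List.foldl_cons, if_neg h, ih, List.mem_cons]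
      by_cases hx : x = k
      · subst hx; simp [h]
      · simp [hx]

-- membership in the outer position fold
theorem pvMemOuter (cond : Nat → String → Bool) (is : List Nat) (s : PySem.Set String) (x : String) :
    x ∈ is.foldl (fun s i => pvAllKeywords.foldl (fun s k => if cond i k then PySem.Set.add s k else s) s) s ↔
      x ∈ s ∨ (x ∈ pvAllKeywords ∧ ∃ i ∈ is, cond i x = true) := by
  induction is generalizing s with
  | nil => simp
  | cons i is ih =>
    simp only [List.foldl_cons, ih, pvMemInner, List.mem_cons]
    constructor
    · rintro ((hs | ⟨hk, hc⟩) | ⟨hk, i', hi', hc⟩)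
      · exact Or.inl hs
      · exact Or.inr ⟨hk, i, Or.inl rfl, hc⟩
      · exact Or.inr ⟨hk, i', Or.inr hi', hc⟩
    · rintro (hs | ⟨hk, i', (rfl | hi'), hc⟩)
      · exact Or.inl (Or.inl hs)
      · exact Or.inl (Or.inr ⟨hk, hc⟩)
      · exact Or.inr ⟨hk, i', hi', hc⟩

-- a nonempty keyword is in 'found' exactly when Python's 'k in text' holds
theorem pvFoundIff (text : String) (k : String) (hk : k ∈ pvAllKeywords) (hne : k.toList ≠ []) :
    PySem.Set.contains (pvFound text) k = PySem.Str.isIn k text := by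
  rcases h : PySem.Str.isIn k text with _ | _
  · -- isIn = false: no occurrence anywhere
    rw [PySem.Str.isIn_eq] at h
    rw [PySem.Chars.isIn_eq_false_iff] at h
    by_contra hc
    have hc' : PySem.Set.contains (pvFound text) k = true := by
      cases hcc : PySem.Set.contains (pvFound text) k
      · exact absurd hcc hc
      · rfl
    rw [PySem.Set.contains_iff] at hc'
    unfold pvFound at hc'
    rw [pvMemOuter] at hc'
    rcases hc' with h0 | ⟨_, i, _, hsw⟩
    · simp [PySem.Set.empty] at h0
    · rw [PySem.Chars.startswith_iff] at hsw
      exact h (hsw.isInfix.trans (text.toList.drop_suffix i).isInfix)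
  · -- isIn = true: k is a prefix of some drop j, and that j is < length since k is nonempty
    rw [PySem.Str.isIn_eq] at h
    have hex : ∃ j, k.toList <+: text.toList.drop j :=
      (PySem.Chars.exists_prefix_drop_iff_isIn k.toList text.toList).mpr h
    rcases hex with ⟨j, hj⟩
    have hjlt : j < text.toList.length := by
      by_contra hge
      push Not at hge
      rw [List.drop_eq_nil_of_le hge] at hj
      exact hne (List.prefix_nil.mp hj)
    have : PySem.Set.contains (pvFound text) k = true := by
      rw [PySem.Set.contains_iff]
      unfold pvFound
      rw [pvMemOuter]
      exact Or.inr ⟨hk, j, List.mem_range.mpr hjlt, (PySem.Chars.startswith_iff _ _).mpr hj⟩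
    rw [this]

-- one unfolding step of B's filter-then-map over the rule table
theorem pvFilterMapStep {α β : Type} (p : α → Bool) (f : α → β) (r : α) (rs : List α) :
    ((r :: rs).filter p).map f = (if p r = true then [f r] else []) ++ (rs.filter p).map f := by
  by_cases h : p r = true <;> simp [h]

-- the let-chain step of A: conditional append moved to the right of the accumulator
theorem pvStepApp (b : Bool) (t : List String) (s : String) :
    (if b = true then t ++ [s] else t) = t ++ (if b = true then [s] else []) := by
  cases b <;> simp

-- ===== VERDICT (by name: the statement is the Claim_ definition above) =====
theorem identify_market_trends_py_spec : Claim_equal_identify_market_trends_py := by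
  intro text _
  unfold Spec_identify_market_trends_py identify_market_trends_py identify_market_trends_py_alt pvTrendRules
  simp only [pvFilterMapStep, List.filter_nil, List.map_nil, List.append_nil, pvStepApp,
    List.any_cons, List.any_nil, Bool.or_false,
    pvFoundIff text "digital" (by decide) (by decide),
    pvFoundIff text "online" (by decide) (by decide),
    pvFoundIff text "cloud" (by decide) (by decide),
    pvFoundIff text "saas" (by decide) (by decide),
    pvFoundIff text "ai" (by decide) (by decide),
    pvFoundIff text "machine learning" (by decide) (by decide),
    pvFoundIff text "automation" (by decide) (by decide),
    pvFoundIff text "remote" (by decide) (by decide),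
    pvFoundIff text "hybrid" (by decide) (by decide),
    pvFoundIff text "distributed" (by decide) (by decide),
    pvFoundIff text "sustainable" (by decide) (by decide),
    pvFoundIff text "green" (by decide) (by decide),
    pvFoundIff text "climate" (by decide) (by decide),
    pvFoundIff text "esg" (by decide) (by decide),
    pvFoundIff text "privacy" (by decide) (by decide),
    pvFoundIff text "security" (by decide) (by decide),
    pvFoundIff text "cybersecurity" (by decide) (by decide),
    pvFoundIff text "personalization" (by decide) (by decide),
    pvFoundIff text "customization" (by decide) (by decide),
    pvFoundIff text "tailored" (by decide) (by decide),
    pvFoundIff text "subscription" (by decide) (by decide),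
    pvFoundIff text "recurring revenue" (by decide) (by decide),
    pvFoundIff text "mobile" (by decide) (by decide),
    pvFoundIff text "health" (by decide) (by decide),
    pvFoundIff text "medical" (by decide) (by decide),
    pvFoundIff text "telemedicine" (by decide) (by decide),
    pvFoundIff text "blockchain" (by decide) (by decide),
    pvFoundIff text "web3" (by decide) (by decide),
    pvFoundIff text "decentralized" (by decide) (by decide)]
  simp only [List.nil_append, List.append_assoc]
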